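-- pv_equiv track=rewrite | github.com/marcussilvait/coding-exercises | leet-code/ranks_elements.py | solution
-- ===== SOURCE A (Python) =====
-- def solution(s):
--     caracteres_ordenados = sorted(s)
--
--     caracter_anterior = caracteres_ordenados[0]
--     contagem = 0
--     max_int = max(caracteres_ordenados)
--
--     for caracter in caracteres_ordenados:
--
--         superior = caracter + 1
--
--         if caracter != max_int:
--             caracter_anterior = caracter
--             for i in caracteres_ordenados:
--                 if i == superior:
--                     contagem += 1
--
--     return contagem
-- ===== SOURCE B (Python) =====
-- def solution(s):
--     counts = {}
--     for v in s:
--         counts[v] = counts.get(v, 0) + 1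
--     total = 0
--     for v, c in counts.items():
--         total += c * counts.get(v + 1, 0)
--     return total
-- ===== Notes on version B (the rewrite author's own statement) =====
-- stated objective: faster
-- what changed: Replaced A's sort plus nested full-list scan per element with a single dict counting pass and one sum of count(v)*count(v+1) over the distinct values.
import Mathlib
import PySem

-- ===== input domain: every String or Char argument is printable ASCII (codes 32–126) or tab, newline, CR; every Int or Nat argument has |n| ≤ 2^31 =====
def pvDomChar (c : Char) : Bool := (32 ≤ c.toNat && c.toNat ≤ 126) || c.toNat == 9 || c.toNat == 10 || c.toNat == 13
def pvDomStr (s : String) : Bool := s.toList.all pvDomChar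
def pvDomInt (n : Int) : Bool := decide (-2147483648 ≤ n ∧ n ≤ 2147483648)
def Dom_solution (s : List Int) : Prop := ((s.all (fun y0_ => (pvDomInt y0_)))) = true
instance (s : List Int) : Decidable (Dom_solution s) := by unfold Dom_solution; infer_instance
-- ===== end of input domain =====

-- B replaces A's O(n^2) nested scans over the sorted list with a single counting
-- pass and one sum over the distinct values (objective: faster, asymptotic).

-- ===== PORT A =====
def solution (s : List Int) : Int :=
  let t := PySem.List.sorted s (fun x => x) false
  -- caracter_anterior = caracteres_ordenados[0]  (raises IndexError on []; excluded by Pre_;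
  -- the variable is written but never read afterwards)
  let mx := (PySem.List.max? t (fun x => x)).getD 0   -- max(...) raises on []; excluded by Pre_
  t.foldl (fun contagem caracter =>
    if caracter ≠ mx then
      t.foldl (fun acc i => if i == caracter + 1 then acc + 1 else acc) contagem
    else contagem) 0

-- ===== PORT B =====
def solution_alt (s : List Int) : Int :=
  let counts := s.foldl (fun d v => d.insert v (d.getD v 0 + 1))
    (PySem.Dict.empty : PySem.Dict Int Int)
  counts.items.foldl (fun total p => total + p.2 * counts.getD (p.1 + 1) 0) 0

-- ===== PRECONDITION & SPEC =====
-- Pre_ excludes only the empty list, on which A raises IndexError (s[0]) while B returns 0.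
def Pre_solution (s : List Int) : Prop := s ≠ []
instance (s : List Int) : Decidable (Pre_solution s) := by unfold Pre_solution; infer_instance
def pvWitness_solution : List Int := [1, 2, 2, 5]

def Spec_solution (s : List Int) (out : Int) : Prop := out = solution_alt s
instance (s : List Int) (out : Int) : Decidable (Spec_solution s out) := by unfold Spec_solution; infer_instance

-- ===== CLAIM (what is proved, stated in full; the proofs are below) =====
def Claim_equal_solution : Prop := ∀ (s : List Int), Dom_solution s → Pre_solution s → Spec_solution s (solution s)
-- ===== LEMMAS AND PROOFS =====

-- Both sides equal Σ_{x ∈ s} count_s(x+1).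
theorem solution_eq_sum (s : List Int) (hs : s ≠ []) :
    solution s = (s.map (fun x => (s.count (x + 1) : Int))).sum := by
  unfold solution
  have hperm : (PySem.List.sorted s (fun x => x) false).Perm s :=
    PySem.List.sorted_perm s (fun x => x) false
  set t := PySem.List.sorted s (fun x => x) false with ht
  have htne : t ≠ [] := by
    intro h; exact hs (List.Perm.eq_nil ((h ▸ hperm).symm))
  obtain ⟨m, hm⟩ : ∃ m, PySem.List.max? t (fun x => x) = some m := by
    cases h : PySem.List.max? t (fun x => x) with
    | none => exact absurd ((PySem.List.max?_eq_none_iff t (fun x => x)).mp h) htne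
    | some m => exact ⟨m, rfl⟩
    -- max?_eq_none_iff : max? = none ↔ list = []
  have hmax : ∀ y ∈ t, y ≤ m := fun y hy => PySem.List.max?_isMax hm y hy
  have hcount : t.count (m + 1) = 0 := by
    rw [List.count_eq_zero]
    intro hmem; exact absurd (hmax _ hmem) (by omega)
  simp only [hm, Option.getD_some]
  have hbody : ∀ (acc : Int) (c : Int), c ∈ t →
      (if c ≠ m then t.foldl (fun a i => if i == c + 1 then a + 1 else a) acc else acc)
        = acc + (t.count (c + 1) : Int) := by
    intro acc c _
    by_cases hc : c = m
    · subst hc; simp [hcount]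
    · rw [if_pos hc]; exact PySem.List.foldl_beq_add_one t (c + 1) acc
  have step1 : List.foldl (fun contagem caracter =>
      if caracter ≠ m then
        List.foldl (fun acc i => if i == caracter + 1 then acc + 1 else acc) contagem t
      else contagem) 0 t
      = List.foldl (fun acc c => acc + (t.count (c + 1) : Int)) 0 t :=
    PySem.List.foldl_congr_mem t _ _ 0 hbody
  rw [step1, PySem.List.foldl_add (g := fun c => (t.count (c + 1) : Int))]
  have hc2 : ∀ v : Int, t.count v = s.count v := fun v => hperm.count_eq v
  calc (0 : Int) + (t.map (fun c => (t.count (c + 1) : Int))).sum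
      = (t.map (fun c => (s.count (c + 1) : Int))).sum := by
        simp only [zero_add]; congr 1; exact List.map_congr_left (fun c _ => by rw [hc2])
    _ = (s.map (fun x => (s.count (x + 1) : Int))).sum :=
        List.Perm.sum_eq (hperm.map _)

theorem solution_alt_eq_sum (s : List Int) :
    solution_alt s = (s.map (fun x => (s.count (x + 1) : Int))).sum := by
  unfold solution_alt
  rw [PySem.Dict.foldl_insert_getD_add_one_eq_counter]
  rw [PySem.List.foldl_add
    (g := fun p : Int × Int => p.2 * (PySem.Dict.counter s).getD (p.1 + 1) 0)]
  rw [PySem.Dict.items_counter]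
  simp only [zero_add, List.map_map, Function.comp_def, PySem.Dict.getD_counter]
  have hnd : (PySem.Set.ofList s).Nodup := PySem.Set.nodup_ofList s
  have hmem : (PySem.Set.ofList s).toFinset = s.toFinset := by
    ext x; simp [PySem.Set.mem_ofList]
  rw [← List.sum_toFinset _ hnd, hmem,
      Finset.sum_list_map_count s (fun x => (s.count (x + 1) : Int))]
  simp

-- ===== VERDICT (by name: the statement is the Claim_ definition above) =====
theorem solution_spec : Claim_equal_solution := by
  intro s _ hpre
  unfold Spec_solution
  rw [solution_eq_sum s hpre, solution_alt_eq_sum s]
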